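-- pv_equiv track=rewrite | github.com/1000zoo/python-programmers | level3/represent_with_N.py | solution
-- ===== SOURCE A (Python) =====
-- def solution(N, number):
--     if N == number:
--         return 1
--     set_list = [{N}]
--
--     while len(set_list) < 8:
--         curr_index = len(set_list) + 1
--         new_set = {int(str(N) * curr_index)}  # curr_index 번 사용해서 만들 수 있는 모든 중복없는 수들
--         for i in range(1, curr_index):
--             j = curr_index - i
--             set_i = set_list[i - 1]
--             set_j = set_list[j - 1]
--             for n in set_i:
--                 for m in set_j:
--                     all_calculate(new_set, n, m)
--
--         if number in new_set:
--             return curr_index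
--
--         set_list.append(new_set)
--
--     return -1
--
-- def all_calculate(_set: set, a: int, b: int):
--     _set.add(a + b)
--     _set.add(a - b)
--     _set.add(a * b)
--     if b != 0:
--         _set.add(a // b)
-- ===== SOURCE B (Python) =====
-- def solution(N, number):
--     if N == number:
--         return 1
--     cache = {}
--
--     def reachable(k):
--         if k in cache:
--             return cache[k]
--         if k == 1:
--             s = {N}
--         else:
--             s = {int(str(N) * k)}
--             for i in range(1, k):
--                 si = reachable(i)
--                 sj = reachable(k - i)
--                 for a in si:
--                     for b in sj:
--                         s.add(a + b)
--                         s.add(a - b)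
--                         s.add(a * b)
--                         if b != 0:
--                             s.add(a // b)
--         cache[k] = s
--         return s
--
--     for k in range(2, 9):
--         if number in reachable(k):
--             return k
--     return -1
-- ===== Notes on version B (the rewrite author's own statement) =====
-- stated objective: alternative
-- what changed: Replaces A's bottom-up while-loop that grows an explicit set_list with a memoized top-down recursion reachable(k) over a cache dict, scanned by a for-loop over k=2..8.
-- outside the precondition, e.g. on solution(-3, 7): A raises ValueError, B raises ValueError
import Mathlib
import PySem

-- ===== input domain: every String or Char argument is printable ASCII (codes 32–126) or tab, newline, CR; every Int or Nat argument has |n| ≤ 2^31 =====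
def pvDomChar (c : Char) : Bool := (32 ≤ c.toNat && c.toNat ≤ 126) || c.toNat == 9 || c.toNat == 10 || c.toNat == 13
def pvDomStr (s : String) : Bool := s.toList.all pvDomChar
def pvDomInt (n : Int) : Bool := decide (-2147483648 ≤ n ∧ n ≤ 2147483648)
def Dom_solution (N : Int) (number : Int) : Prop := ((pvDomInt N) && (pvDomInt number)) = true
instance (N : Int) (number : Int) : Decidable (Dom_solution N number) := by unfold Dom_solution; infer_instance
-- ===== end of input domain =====

-- B replaces A's bottom-up set_list while-loop by a memoized top-down recursion reachable(k)
-- with a cache dict; same cost, alternative decomposition (return values proved equal on Pre_).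
-- Python 'set' is modelled by Std.HashSet Int (Python's set IS a hash set); both programs only
-- consume the sets through membership and set-building, so the result does not depend on
-- iteration order (that independence is what the proofs below establish).


-- ===== PORT A =====
-- int(str(N) * c); PySem.Int.ofChars? is none exactly where Python's int() raises (N < 0 gives
-- e.g. "-5-5"): those inputs are excluded by Pre_, the .getD 0 default is never relied upon inside Pre_.
def pvA_repunit (N : Int) (c : Nat) : Int :=
  (PySem.Int.ofChars? (PySem.List.pyRepeat (PySem.Int.toChars N) (c : Int))).getD 0

def pvA_allCalculate (s : Std.HashSet Int) (a b : Int) : Std.HashSet Int :=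
  let s1 := s.insert (a + b)
  let s2 := s1.insert (a - b)
  let s3 := s2.insert (a * b)
  if b ≠ 0 then s3.insert (PySem.Int.floordiv a b) else s3

def pvA_newSet (N : Int) (setList : List (Std.HashSet Int)) (c : Nat) : Std.HashSet Int :=
  (PySem.List.pyRange 1 (c : Int) 1).foldl
    (fun newSet i =>
      let j : Int := (c : Int) - i
      let setI := PySem.List.pyGetD setList (i - 1) ∅
      let setJ := PySem.List.pyGetD setList (j - 1) ∅
      setI.fold (fun acc n => setJ.fold (fun acc2 m => pvA_allCalculate acc2 n m) acc) newSet)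
    (Std.HashSet.ofList [pvA_repunit N c])

-- the while-loop: it runs at most 7 times (lengths 1..7), fuel 8 makes the recursion total
def pvA_loop (N number : Int) : Nat → List (Std.HashSet Int) → Int
  | 0, _ => -1
  | fuel+1, setList =>
    if setList.length < 8 then
      let c := setList.length + 1
      let ns := pvA_newSet N setList c
      if ns.contains number then (c : Int)
      else pvA_loop N number fuel (setList ++ [ns])
    else -1

def solution (N : Int) (number : Int) : Int :=
  if N = number then 1 else pvA_loop N number 8 [Std.HashSet.ofList [N]]

-- ===== PORT B =====
-- memoized reachable(k): the cache dict is threaded through; fuel (≥ k suffices) makes the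
-- recursion structural, it only guards totality
def pvB_reach (N : Int) : Nat → Nat → PySem.Dict Int (Std.HashSet Int) →
    Std.HashSet Int × PySem.Dict Int (Std.HashSet Int)
  | 0, _, cache => (∅, cache)
  | fuel+1, k, cache =>
    match PySem.Dict.get? cache (k : Int) with
    | some s => (s, cache)
    | none =>
      let r :=
        if k = 1 then ((Std.HashSet.ofList [N] : Std.HashSet Int), cache)
        else
          (PySem.List.pyRange 1 (k : Int) 1).foldl
            (fun (st : Std.HashSet Int × PySem.Dict Int (Std.HashSet Int)) i =>
              let p1 := pvB_reach N fuel i.toNat st.2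
              let p2 := pvB_reach N fuel (k - i.toNat) p1.2
              -- the four s.add(...) lines of Source B's inner loop, inline
              (p1.1.fold (fun acc a => p2.1.fold (fun acc2 b =>
                  let s1 := acc2.insert (a + b)
                  let s2 := s1.insert (a - b)
                  let s3 := s2.insert (a * b)
                  if b ≠ 0 then s3.insert (PySem.Int.floordiv a b) else s3) acc) st.1,
               p2.2))
            -- int(str(N) * k) as in Source B; none (N < 0, ValueError) excluded by Pre_
            (Std.HashSet.ofList [(PySem.Int.ofChars? (PySem.List.pyRepeat (PySem.Int.toChars N) (k : Int))).getD 0], cache)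
      (r.1, PySem.Dict.insert r.2 (k : Int) r.1)

-- 'for k in range(2, 9): if number in reachable(k): return k' with early return
def pvB_scan (N number : Int) : List Int → PySem.Dict Int (Std.HashSet Int) → Int
  | [], _ => -1
  | k :: rest, cache =>
    let p := pvB_reach N 9 k.toNat cache
    if p.1.contains number then k else pvB_scan N number rest p.2

def solution_alt (N : Int) (number : Int) : Int :=
  if N = number then 1 else pvB_scan N number (PySem.List.pyRange 2 9 1) PySem.Dict.empty

-- ===== PRECONDITION & SPEC =====
-- Pre_ excludes N < 0 with N ≠ number, exactly where the Python A raises ValueError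
-- (int(str(N)*k) on a string like "-5-5"); B raises the same ValueError there.
def Pre_solution (N : Int) (number : Int) : Prop := 0 ≤ N ∨ N = number
instance (N : Int) (number : Int) : Decidable (Pre_solution N number) := by unfold Pre_solution; infer_instance
def pvWitness_solution : Int × Int := (5, 12)

def Spec_solution (N : Int) (number : Int) (out : Int) : Prop := out = solution_alt N number
instance (N : Int) (number : Int) (out : Int) : Decidable (Spec_solution N number out) := by unfold Spec_solution; infer_instance

-- ===== CLAIM (what is proved, stated in full; the proofs are below) =====
def Claim_equal_solution : Prop := ∀ (N : Int) (number : Int), Dom_solution N number → Pre_solution N number → Spec_solution N number (solution N number)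

-- ===== LEMMAS AND PROOFS =====

-- the set of values the four arithmetic insertions produce from a and b
def pvComb (a b x : Int) : Prop :=
  x = a + b ∨ x = a - b ∨ x = a * b ∨ (b ≠ 0 ∧ x = PySem.Int.floordiv a b)

-- the values representable with exactly k copies of N (k ≥ 2 levels also contain the repunit)
inductive pvReach (N : Int) : Nat → Int → Prop
  | one : pvReach N 1 N
  | rep (k : Nat) (h : 2 ≤ k) : pvReach N k (pvA_repunit N k)
  | comb {i j : Nat} {a b x : Int} (hi : 1 ≤ i) (hj : 1 ≤ j)
      (ha : pvReach N i a) (hb : pvReach N j b) (hx : pvComb a b x) : pvReach N (i + j) x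

theorem mem_allCalculate (s : Std.HashSet Int) (a b x : Int) :
    x ∈ pvA_allCalculate s a b ↔ x ∈ s ∨ pvComb a b x := by
  unfold pvA_allCalculate pvComb
  split_ifs with hb <;> simp [Std.HashSet.mem_insert, hb] <;> tauto

theorem mem_foldl_step {α : Type} (l : List α) (F : Std.HashSet Int → α → Std.HashSet Int)
    (Q : α → Int → Prop) (x : Int)
    (h : ∀ (s : Std.HashSet Int) (i : α), i ∈ l → (x ∈ F s i ↔ x ∈ s ∨ Q i x))
    (s0 : Std.HashSet Int) :
    x ∈ l.foldl F s0 ↔ x ∈ s0 ∨ ∃ i ∈ l, Q i x := by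
  induction l generalizing s0 with
  | nil => simp
  | cons i l ih =>
    simp only [List.foldl_cons]
    rw [ih (fun s i hi => h s i (List.mem_cons_of_mem _ hi)), h s0 i List.mem_cons_self]
    simp only [List.mem_cons]
    constructor
    · rintro ((hs | hq) | ⟨i', hi', hq⟩)
      · exact Or.inl hs
      · exact Or.inr ⟨i, Or.inl rfl, hq⟩
      · exact Or.inr ⟨i', Or.inr hi', hq⟩
    · rintro (hs | ⟨i', (rfl | hi'), hq⟩)
      · exact Or.inl (Or.inl hs)
      · exact Or.inl (Or.inr hq)
      · exact Or.inr ⟨i', hi', hq⟩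

theorem mem_ofList_singleton (y x : Int) :
    x ∈ (Std.HashSet.ofList [y] : Std.HashSet Int) ↔ x = y := by
  rw [Std.HashSet.mem_ofList]
  simp

theorem mem_pairFold (si sj s0 : Std.HashSet Int) (x : Int) :
    x ∈ si.fold (fun acc a => sj.fold (fun acc2 b => pvA_allCalculate acc2 a b) acc) s0 ↔
      x ∈ s0 ∨ ∃ a ∈ si, ∃ b ∈ sj, pvComb a b x := by
  simp only [Std.HashSet.fold_eq_foldl_toList]
  rw [mem_foldl_step si.toList _ (fun a x => ∃ b ∈ sj.toList, pvComb a b x) x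
    (fun s a _ => mem_foldl_step sj.toList _ (fun b x => pvComb a b x) x
      (fun s' b _ => mem_allCalculate s' a b x) s)]
  refine or_congr Iff.rfl ?_
  constructor
  · rintro ⟨a, ha, b, hb, hc⟩
    exact ⟨a, Std.HashSet.mem_toList.mp ha, b, Std.HashSet.mem_toList.mp hb, hc⟩
  · rintro ⟨a, ha, b, hb, hc⟩
    exact ⟨a, Std.HashSet.mem_toList.mpr ha, b, Std.HashSet.mem_toList.mpr hb, hc⟩

theorem pvReach_one (N x : Int) : pvReach N 1 x ↔ x = N := by
  constructor
  · intro h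
    have key : ∀ k, pvReach N k x → k = 1 → x = N := by
      intro k h
      cases h with
      | one => intro _; rfl
      | rep k hk => intro h1; omega
      | comb hi hj ha hb hx => intro h1; omega
    exact key 1 h rfl
  · rintro rfl; exact pvReach.one

theorem pvReach_iff (N : Int) (c : Nat) (hc : 2 ≤ c) (x : Int) :
    pvReach N c x ↔
      x = pvA_repunit N c ∨
        ∃ i ∈ PySem.List.pyRange 1 (c : Int) 1, ∃ a, pvReach N i.toNat a ∧
          ∃ b, pvReach N (c - i.toNat) b ∧ pvComb a b x := by
  constructor
  · intro h
    have key : ∀ k, pvReach N k x → k = c →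
        x = pvA_repunit N c ∨
          ∃ i ∈ PySem.List.pyRange 1 (c : Int) 1, ∃ a, pvReach N i.toNat a ∧
            ∃ b, pvReach N (c - i.toNat) b ∧ pvComb a b x := by
      intro k h
      cases h with
      | one => intro h1; omega
      | rep k hk => rintro rfl; exact Or.inl rfl
      | comb hi hj ha hb hx =>
        rename_i i j a b
        intro hk
        refine Or.inr ⟨(i : Int), ?_, a, ?_, b, ?_, hx⟩
        · rw [PySem.List.mem_pyRange_one]; constructor <;> [exact_mod_cast hi; exact_mod_cast (by omega : (i:Int) < (c:Int))]
        · simpa using ha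
        · have hj' : c - (i : Int).toNat = j := by omega
          rwa [hj']
    exact key c h rfl
  · rintro (rfl | ⟨i, hmem, a, ha, b, hb, hx⟩)
    · exact pvReach.rep c hc
    · rw [PySem.List.mem_pyRange_one] at hmem
      have h := pvReach.comb (N := N) (by omega : 1 ≤ i.toNat)
        (by omega : 1 ≤ c - i.toNat) ha hb hx
      have hsum : i.toNat + (c - i.toNat) = c := by omega
      rwa [hsum] at h

-- A-side loop invariant: position k of set_list holds exactly the level-(k+1) values
def pvInvA (N : Int) (L : List (Std.HashSet Int)) : Prop :=
  ∀ (k : Nat) (hk : k < L.length) (x : Int), x ∈ L[k] ↔ pvReach N (k + 1) x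

theorem mem_newSet (N : Int) (L : List (Std.HashSet Int)) (hInv : pvInvA N L)
    (hL : 1 ≤ L.length) (x : Int) :
    x ∈ pvA_newSet N L (L.length + 1) ↔ pvReach N (L.length + 1) x := by
  have hc : 2 ≤ L.length + 1 := by omega
  rw [pvReach_iff N (L.length + 1) hc x]
  unfold pvA_newSet
  rw [mem_foldl_step _ _
    (fun (i : Int) (x : Int) =>
      ∃ a ∈ PySem.List.pyGetD L (i - 1) (∅ : Std.HashSet Int),
        ∃ b ∈ PySem.List.pyGetD L (((L.length + 1 : Nat) : Int) - i - 1) (∅ : Std.HashSet Int),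
          pvComb a b x) x
    (fun s i _ => mem_pairFold _ _ s x)]
  refine or_congr ?_ (exists_congr fun i => and_congr_right fun hmem => ?_)
  · exact mem_ofList_singleton _ x
  · rw [PySem.List.mem_pyRange_one] at hmem
    have hi1 : (0:Int) ≤ i - 1 := by omega
    have hi2 : i - 1 < (L.length : Int) := by push_cast at hmem ⊢; omega
    have hj1 : (0:Int) ≤ ((L.length + 1 : Nat) : Int) - i - 1 := by push_cast at hmem ⊢; omega
    have hj2 : ((L.length + 1 : Nat) : Int) - i - 1 < (L.length : Int) := by
      push_cast at hmem ⊢; omega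
    rw [PySem.List.pyGetD_eq_getElem L _ hi1 hi2, PySem.List.pyGetD_eq_getElem L _ hj1 hj2]
    refine exists_congr fun a => and_congr ?_ (exists_congr fun b => and_congr ?_ Iff.rfl)
    · have e : (i - 1).toNat + 1 = i.toNat := by omega
      rw [hInv (i - 1).toNat (by omega) a, e]
    · have e : ((((L.length + 1 : Nat) : Int) - i - 1).toNat) + 1 = (L.length + 1) - i.toNat := by
        push_cast at hmem ⊢; omega
      rw [hInv _ (by omega) b, e]

-- B-side cache invariant
def pvValid (N : Int) (cache : PySem.Dict Int (Std.HashSet Int)) : Prop :=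
  ∀ (k : Nat) (s : Std.HashSet Int), PySem.Dict.get? cache (k : Int) = some s →
    ∀ x, x ∈ s ↔ pvReach N k x

theorem pvB_fold_gen {Q : Int → Int → Prop} (N : Int)
    (G : Std.HashSet Int × PySem.Dict Int (Std.HashSet Int) → Int →
      Std.HashSet Int × PySem.Dict Int (Std.HashSet Int)) :
    ∀ (l : List Int),
    (∀ st i, i ∈ l → pvValid N st.2 →
      pvValid N (G st i).2 ∧ ∀ x, (x ∈ (G st i).1 ↔ x ∈ st.1 ∨ Q i x)) →
    ∀ st, pvValid N st.2 →
    pvValid N (l.foldl G st).2 ∧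
      ∀ x, (x ∈ (l.foldl G st).1 ↔ x ∈ st.1 ∨ ∃ i ∈ l, Q i x) := by
  intro l
  induction l with
  | nil => exact fun _ st hv => ⟨hv, fun x => by simp⟩
  | cons i l ih =>
    intro hG st hv
    simp only [List.foldl_cons]
    obtain ⟨hv', hm'⟩ := hG st i List.mem_cons_self hv
    obtain ⟨hv2, hm2⟩ := ih (fun st j hj hvv => hG st j (List.mem_cons_of_mem _ hj) hvv) (G st i) hv'
    refine ⟨hv2, fun x => ?_⟩
    rw [hm2 x, hm' x]
    simp only [List.mem_cons]
    constructor
    · rintro ((hs | hq) | ⟨i', hi', hq⟩)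
      · exact Or.inl hs
      · exact Or.inr ⟨i, Or.inl rfl, hq⟩
      · exact Or.inr ⟨i', Or.inr hi', hq⟩
    · rintro (hs | ⟨i', (rfl | hi'), hq⟩)
      · exact Or.inl (Or.inl hs)
      · exact Or.inl (Or.inr hq)
      · exact Or.inr ⟨i', hi', hq⟩

theorem pvB_reach_spec (N : Int) : ∀ (fuel k : Nat) (cache : PySem.Dict Int (Std.HashSet Int)),
    1 ≤ k → k ≤ fuel → pvValid N cache →
    pvValid N (pvB_reach N fuel k cache).2 ∧
      (∀ x, x ∈ (pvB_reach N fuel k cache).1 ↔ pvReach N k x) := by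
  intro fuel
  induction fuel with
  | zero => intro k cache hk hf hval; omega
  | succ fuel ih =>
    intro k cache hk hf hval
    simp only [pvB_reach]
    cases hg : PySem.Dict.get? cache ((k : Nat) : Int) with
    | some s => exact ⟨hval, hval k s hg⟩
    | none =>
      by_cases h1 : k = 1
      · subst h1
        rw [if_pos rfl]
        have hmem1 : ∀ x : Int, x ∈ (Std.HashSet.ofList [N] : Std.HashSet Int) ↔ pvReach N 1 x := by
          intro x
          rw [pvReach_one]
          exact mem_ofList_singleton _ x
        refine ⟨?_, hmem1⟩
        intro k' s' hget
        rw [PySem.Dict.get?_insert] at hget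
        split_ifs at hget with he
        · cases hget
          have hk1 : k' = 1 := by exact_mod_cast he
          subst hk1
          exact hmem1
        · exact hval k' s' hget
      · rw [if_neg h1]
        have hG : ∀ (st : Std.HashSet Int × PySem.Dict Int (Std.HashSet Int)) (i : Int),
            i ∈ PySem.List.pyRange 1 (k : Int) 1 → pvValid N st.2 →
            pvValid N ((fun (st : Std.HashSet Int × PySem.Dict Int (Std.HashSet Int)) i =>
              ((pvB_reach N fuel i.toNat st.2).1.fold
                (fun acc a => (pvB_reach N fuel (k - i.toNat) (pvB_reach N fuel i.toNat st.2).2).1.fold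
                  (fun acc2 b => pvA_allCalculate acc2 a b) acc) st.1,
               (pvB_reach N fuel (k - i.toNat) (pvB_reach N fuel i.toNat st.2).2).2)) st i).2 ∧
            ∀ x, (x ∈ ((fun (st : Std.HashSet Int × PySem.Dict Int (Std.HashSet Int)) i =>
              ((pvB_reach N fuel i.toNat st.2).1.fold
                (fun acc a => (pvB_reach N fuel (k - i.toNat) (pvB_reach N fuel i.toNat st.2).2).1.fold
                  (fun acc2 b => pvA_allCalculate acc2 a b) acc) st.1,
               (pvB_reach N fuel (k - i.toNat) (pvB_reach N fuel i.toNat st.2).2).2)) st i).1 ↔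
              x ∈ st.1 ∨ ∃ a, pvReach N i.toNat a ∧ ∃ b, pvReach N (k - i.toNat) b ∧ pvComb a b x) := by
          intro st i hi hv
          rw [PySem.List.mem_pyRange_one] at hi
          obtain ⟨hvA, hmA⟩ := ih i.toNat st.2 (by omega) (by omega) hv
          obtain ⟨hvB, hmB⟩ := ih (k - i.toNat) (pvB_reach N fuel i.toNat st.2).2
            (by omega) (by omega) hvA
          refine ⟨hvB, fun x => ?_⟩
          rw [mem_pairFold]
          exact or_congr Iff.rfl (exists_congr fun a => and_congr (hmA a)
            (exists_congr fun b => and_congr (hmB b) Iff.rfl))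
        have hfold := pvB_fold_gen
          (Q := fun i x => ∃ a, pvReach N i.toNat a ∧ ∃ b, pvReach N (k - i.toNat) b ∧ pvComb a b x)
          N _ (PySem.List.pyRange 1 (k : Int) 1) hG
          ((Std.HashSet.ofList [(PySem.Int.ofChars? (PySem.List.pyRepeat
              (PySem.Int.toChars N) ((k : Nat) : Int))).getD 0],
            cache) : Std.HashSet Int × PySem.Dict Int (Std.HashSet Int)) hval
        obtain ⟨hvr, hmr⟩ := hfold
        have hiff : ∀ x : Int,
            (x ∈ (Std.HashSet.ofList [(PySem.Int.ofChars? (PySem.List.pyRepeat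
                (PySem.Int.toChars N) ((k : Nat) : Int))).getD 0] : Std.HashSet Int) ∨
              ∃ i ∈ PySem.List.pyRange 1 (k : Int) 1, ∃ a, pvReach N i.toNat a ∧
                ∃ b, pvReach N (k - i.toNat) b ∧ pvComb a b x) ↔ pvReach N k x := by
          intro x
          rw [pvReach_iff N k (by omega) x]
          refine or_congr ?_ Iff.rfl
          exact mem_ofList_singleton _ x
        have hmem := fun x => (hmr x).trans (hiff x)
        refine ⟨?_, hmem⟩
        intro k' s' hget
        rw [PySem.Dict.get?_insert] at hget
        split_ifs at hget with he
        · cases hget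
          have hkk : k' = k := by exact_mod_cast he
          subst hkk
          exact hmem
        · exact hvr k' s' hget

theorem pvLoop_eq (N number : Int) : ∀ (n : Nat) (L : List (Std.HashSet Int))
    (cache : PySem.Dict Int (Std.HashSet Int)),
    L.length + n = 8 → 1 ≤ L.length → pvInvA N L → pvValid N cache →
    pvA_loop N number (n + 1) L =
      pvB_scan N number (PySem.List.pyRange ((L.length : Int) + 1) 9 1) cache := by
  intro n
  induction n with
  | zero =>
    intro L cache hlen h1 hInv hval
    have h8 : L.length = 8 := by omega
    have e9 : (L.length : Int) + 1 = 9 := by omega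
    rw [e9, PySem.List.pyRange_one_eq_nil (by norm_num)]
    simp only [pvA_loop, pvB_scan]
    rw [if_neg (by omega)]
  | succ n ihn =>
    intro L cache hlen h1 hInv hval
    have hlt : L.length < 8 := by omega
    obtain ⟨hv', hm'⟩ := pvB_reach_spec N 9 (L.length + 1) cache (by omega) (by omega) hval
    have hA := mem_newSet N L hInv h1
    have etn : ((L.length : Int) + 1).toNat = L.length + 1 := by omega
    rw [PySem.List.pyRange_one_cons (by omega : (L.length : Int) + 1 < 9)]
    rw [pvA_loop, pvB_scan, etn, if_pos hlt]
    by_cases hR : pvReach N (L.length + 1) number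
    · rw [if_pos (by rw [Std.HashSet.contains_iff_mem]; exact (hA number).mpr hR),
        if_pos (by rw [Std.HashSet.contains_iff_mem]; exact (hm' number).mpr hR)]
      push_cast; ring
    · rw [if_neg (by rw [Std.HashSet.contains_iff_mem]; exact fun h => hR ((hA number).mp h)),
        if_neg (by rw [Std.HashSet.contains_iff_mem]; exact fun h => hR ((hm' number).mp h))]
      have hInv' : pvInvA N (L ++ [pvA_newSet N L (L.length + 1)]) := by
        intro k hk x
        rw [List.length_append, List.length_singleton] at hk
        by_cases hkL : k < L.length
        · rw [List.getElem_append_left hkL]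
          exact hInv k hkL x
        · have hkeq : k = L.length := by omega
          subst hkeq
          simp only [List.getElem_concat_length]
          exact hA x
      have := ihn (L ++ [pvA_newSet N L (L.length + 1)])
        (pvB_reach N 9 (L.length + 1) cache).2
        (by simp; omega) (by simp) hInv' hv'
      rw [List.length_append, List.length_singleton] at this
      have ecast : ((L.length + 1 : Nat) : Int) + 1 = (L.length : Int) + 1 + 1 := by push_cast; ring
      rw [ecast] at this
      exact this

-- ===== VERDICT (by name: the statement is the Claim_ definition above) =====
theorem solution_spec : Claim_equal_solution := by
  intro N number _hDom _hPre
  unfold Spec_solution solution solution_alt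
  by_cases h : N = number
  · rw [if_pos h, if_pos h]
  · rw [if_neg h, if_neg h]
    have hInv0 : pvInvA N [Std.HashSet.ofList [N]] := by
      intro k hk x
      rw [List.length_singleton] at hk
      have hk0 : k = 0 := by omega
      subst hk0
      simp only [List.getElem_singleton]
      rw [pvReach_one]
      exact mem_ofList_singleton _ x
    have hval0 : pvValid N (PySem.Dict.empty : PySem.Dict Int (Std.HashSet Int)) := by
      intro k s hget
      rw [PySem.Dict.get?_empty] at hget
      cases hget
    have key := pvLoop_eq N number 7 [Std.HashSet.ofList [N]] PySem.Dict.empty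
      (by simp) (by simp) hInv0 hval0
    rw [List.length_singleton] at key
    norm_num at key
    exact key
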